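-- pv_equiv track=rewrite | github.com/silverjoda/ml_ops | draft/main.py | calc_maximum_rec
-- ===== SOURCE A (Python) =====
-- def calc_maximum_rec(k_lists, cum_sum, M):
--     K = len(k_lists)
--
--     if K == 0:
--         return cum_sum % M
--
--     current_list = k_lists[0]
--
--     best_res = 0
--     for k in range(len(current_list)):
--         res = calc_maximum_rec(k_lists[1:], cum_sum + current_list[k] ** 2, M)
--         if res > best_res:
--             best_res = res
--
--     return best_res
-- ===== SOURCE B (Python) =====
-- def calc_maximum_rec(k_lists, cum_sum, M):
--     # DP over the set of reachable remainders mod M instead of enumerating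
--     # every combination of picks: O(K * M * maxlen) instead of O(prod of lengths).
--     if any(len(lst) == 0 for lst in k_lists):
--         # some list offers no pick: every branch of the search bottoms out at 0
--         return 0
--     if not k_lists:
--         return cum_sum % M
--     reach = {cum_sum % M}
--     for lst in k_lists:
--         reach = {(r + x * x) % M for r in reach for x in lst}
--     best = 0
--     for r in reach:
--         if r > best:
--             best = r
--     return best
-- ===== Notes on version B (the rewrite author's own statement) =====
-- stated objective: faster
-- what changed: Replaces the exponential recursion over every combination of picks with a forward DP over the set of remainders mod M reachable after each list, then takes the max of that set (clamped at 0, which is also what makes any empty list collapse the whole search to 0).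
import Mathlib
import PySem

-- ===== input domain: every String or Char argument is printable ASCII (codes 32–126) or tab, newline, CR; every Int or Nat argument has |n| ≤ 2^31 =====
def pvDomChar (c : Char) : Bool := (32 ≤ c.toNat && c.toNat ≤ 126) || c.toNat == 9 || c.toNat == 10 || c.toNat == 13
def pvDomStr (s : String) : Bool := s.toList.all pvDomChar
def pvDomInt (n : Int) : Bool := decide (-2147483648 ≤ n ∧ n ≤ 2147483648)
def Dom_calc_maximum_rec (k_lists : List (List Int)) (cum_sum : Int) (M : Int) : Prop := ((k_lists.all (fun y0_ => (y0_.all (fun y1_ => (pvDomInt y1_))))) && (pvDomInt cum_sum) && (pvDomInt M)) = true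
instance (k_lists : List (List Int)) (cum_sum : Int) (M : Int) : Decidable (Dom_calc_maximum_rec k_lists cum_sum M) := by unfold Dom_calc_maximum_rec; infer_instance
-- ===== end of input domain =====

-- B replaces A's exponential branch-and-recurse over every combination of picks with a
-- forward DP over the set of remainders mod M reachable after each list (objective: faster).

-- ===== PORT A =====
def calc_maximum_rec : List (List Int) → Int → Int → Int
  | [], cum_sum, M => PySem.Int.mod cum_sum M
  | current_list :: rest, cum_sum, M =>
    current_list.foldl (fun best_res x =>
      let res := calc_maximum_rec rest (cum_sum + x ^ 2) M
      if res > best_res then res else best_res) 0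

-- ===== PORT B =====
-- one DP step: from the set of reachable remainders, the set reachable after one more list
def pvStep (M : Int) (reach : PySem.Set Int) (lst : List Int) : PySem.Set Int :=
  PySem.Set.ofList (reach.flatMap (fun r => lst.map (fun x => PySem.Int.mod (r + x * x) M)))

def calc_maximum_rec_alt (k_lists : List (List Int)) (cum_sum : Int) (M : Int) : Int :=
  if k_lists.any (fun lst => lst.isEmpty) then 0
  else if k_lists.isEmpty then PySem.Int.mod cum_sum M
  else
    let reach := k_lists.foldl (pvStep M) (PySem.Set.ofList [PySem.Int.mod cum_sum M])
    reach.foldl (fun best r => if r > best then r else best) 0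

-- ===== PRECONDITION & SPEC =====
-- Pre_ excludes exactly the inputs where Python raises ZeroDivisionError: M = 0 with no
-- empty list among k_lists (the base case's '% M' is then reached).
def Pre_calc_maximum_rec (k_lists : List (List Int)) (cum_sum : Int) (M : Int) : Prop :=
  ¬ (M = 0 ∧ ∀ l ∈ k_lists, l ≠ [])
instance (k_lists : List (List Int)) (cum_sum : Int) (M : Int) : Decidable (Pre_calc_maximum_rec k_lists cum_sum M) := by unfold Pre_calc_maximum_rec; infer_instance

def pvWitness_calc_maximum_rec : List (List Int) × Int × Int := ([[1, 2], [3]], 5, 7)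

def Spec_calc_maximum_rec (k_lists : List (List Int)) (cum_sum : Int) (M : Int) (out : Int) : Prop := out = calc_maximum_rec_alt k_lists cum_sum M
instance (k_lists : List (List Int)) (cum_sum : Int) (M : Int) (out : Int) : Decidable (Spec_calc_maximum_rec k_lists cum_sum M out) := by unfold Spec_calc_maximum_rec; infer_instance

-- ===== CLAIM (what is proved, stated in full; the proofs are below) =====
def Claim_equal_calc_maximum_rec : Prop := ∀ (k_lists : List (List Int)) (cum_sum : Int) (M : Int), Dom_calc_maximum_rec k_lists cum_sum M → Pre_calc_maximum_rec k_lists cum_sum M → Spec_calc_maximum_rec k_lists cum_sum M (calc_maximum_rec k_lists cum_sum M)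

-- ===== LEMMAS AND PROOFS =====

-- PySem.Int.mod is Python's floor-mod, i.e. Lean's Int.fmod
theorem pvMod_eq_fmod (a b : Int) : PySem.Int.mod a b = Int.fmod a b := by
  simp [PySem.Int.mod, Int.fmod]

theorem pvMod_mod_add (c y M : Int) :
    PySem.Int.mod (PySem.Int.mod c M + y) M = PySem.Int.mod (c + y) M := by
  simp only [pvMod_eq_fmod]
  rw [Int.add_fmod, Int.fmod_fmod_of_dvd _ dvd_rfl, ← Int.add_fmod]

-- max of a list clamped at 0 (the reference shape both ports' folds reduce to)
def pvMX (l : List Int) : Int := l.foldr max 0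

theorem pvMX_nil : pvMX [] = 0 := rfl
theorem pvMX_cons (a : Int) (l : List Int) : pvMX (a :: l) = max a (pvMX l) := rfl

theorem pvMX_nonneg (l : List Int) : 0 ≤ pvMX l := by
  induction l with
  | nil => simp [pvMX]
  | cons a l ih => rw [pvMX_cons]; exact le_max_of_le_right ih

theorem pvFold_best (g : Int → Int) (l : List Int) (b : Int) (hb : 0 ≤ b) :
    l.foldl (fun best x => if g x > best then g x else best) b = max b (pvMX (l.map g)) := by
  induction l generalizing b with
  | nil => simp [pvMX]; omega
  | cons a l ih =>
    rw [List.foldl_cons, ih _ (by split <;> omega), List.map_cons, pvMX_cons]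
    split <;> omega

theorem pvFold_best0 (g : Int → Int) (l : List Int) :
    l.foldl (fun best x => if g x > best then g x else best) 0 = pvMX (l.map g) := by
  rw [pvFold_best _ _ _ le_rfl]; exact max_eq_right (pvMX_nonneg _)

theorem pvMX_le (l : List Int) {x : Int} (hx : x ∈ l) : x ≤ pvMX l := by
  induction l with
  | nil => cases hx
  | cons a l ih =>
    rw [pvMX_cons]
    rcases List.mem_cons.mp hx with rfl | h
    · exact le_max_left _ _
    · exact le_max_of_le_right (ih h)

theorem pvMX_mem_or_zero (l : List Int) : pvMX l = 0 ∨ pvMX l ∈ l := by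
  induction l with
  | nil => left; rfl
  | cons a l ih =>
    rw [pvMX_cons]
    by_cases h : a ≤ pvMX l
    · rw [max_eq_right h]
      rcases ih with h0 | hm
      · left; exact h0
      · right; exact List.mem_cons_of_mem _ hm
    · right; rw [max_eq_left (by omega)]; exact List.mem_cons_self

theorem pvMX_eq_of_mem_iff {A B : List Int} (h : ∀ x, x ∈ A ↔ x ∈ B) : pvMX A = pvMX B := by
  apply le_antisymm
  · rcases pvMX_mem_or_zero A with h0 | hm
    · rw [h0]; exact pvMX_nonneg B
    · exact pvMX_le B ((h _).mp hm)
  · rcases pvMX_mem_or_zero B with h0 | hm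
    · rw [h0]; exact pvMX_nonneg A
    · exact pvMX_le A ((h _).mpr hm)

theorem pvMX_append (A B : List Int) : pvMX (A ++ B) = max (pvMX A) (pvMX B) := by
  induction A with
  | nil => rw [List.nil_append, pvMX_nil, max_eq_right (pvMX_nonneg B)]
  | cons a A ih => simp only [List.cons_append, pvMX_cons, ih, max_assoc]

theorem pvMX_map_flatMap (l : List Int) (g : Int → List Int) :
    pvMX (l.map (fun x => pvMX (g x))) = pvMX (l.flatMap g) := by
  induction l with
  | nil => rfl
  | cons a l ih => simp only [List.map_cons, List.flatMap_cons, pvMX_cons, pvMX_append, ih]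

-- membership in one DP step
theorem pvMem_step (M : Int) (R : PySem.Set Int) (lst : List Int) (y : Int) :
    y ∈ pvStep M R lst ↔ ∃ r ∈ R, ∃ x ∈ lst, y = PySem.Int.mod (r + x * x) M := by
  simp only [pvStep, PySem.Set.mem_ofList, List.mem_flatMap, List.mem_map]
  constructor
  · rintro ⟨r, hr, x, hx, rfl⟩; exact ⟨r, hr, x, hx, rfl⟩
  · rintro ⟨r, hr, x, hx, rfl⟩; exact ⟨r, hr, x, hx, rfl⟩

-- membership in the DP fold distributes over the starting set
theorem pvMem_foldl (M : Int) (ks : List (List Int)) (R : PySem.Set Int) (y : Int) :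
    y ∈ ks.foldl (pvStep M) R ↔ ∃ r ∈ R, y ∈ ks.foldl (pvStep M) [r] := by
  induction ks generalizing R with
  | nil => simp
  | cons lst ks ih =>
    simp only [List.foldl_cons]
    rw [ih]
    constructor
    · rintro ⟨s, hs, hy⟩
      rcases (pvMem_step M R lst s).mp hs with ⟨r, hr, x, hx, rfl⟩
      refine ⟨r, hr, ?_⟩
      rw [ih]
      exact ⟨_, (pvMem_step M [r] lst _).mpr ⟨r, List.mem_singleton.mpr rfl, x, hx, rfl⟩, hy⟩
    · rintro ⟨r, hr, hy⟩
      rw [ih] at hy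
      rcases hy with ⟨s, hs, hy⟩
      rcases (pvMem_step M [r] lst s).mp hs with ⟨r', hr', x, hx, rfl⟩
      rcases List.mem_singleton.mp hr' with rfl
      exact ⟨_, (pvMem_step M R lst _).mpr ⟨r', hr, x, hx, rfl⟩, hy⟩

-- max of a constant-0 map is 0
theorem pvMX_map_zero (l : List Int) : pvMX (l.map (fun _ => (0 : Int))) = 0 := by
  induction l with
  | nil => rfl
  | cons a l ih => rw [List.map_cons, pvMX_cons, ih]; omega

-- A collapses to 0 as soon as some list is empty
theorem pvA_empty (ks : List (List Int)) (c M : Int) (h : ∃ l ∈ ks, l = []) :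
    calc_maximum_rec ks c M = 0 := by
  induction ks generalizing c with
  | nil => simp at h
  | cons l rest ih =>
    by_cases hl : l = []
    · subst hl; rfl
    · have hrest : ∃ l' ∈ rest, l' = [] := by
        rcases h with ⟨l', hl', he⟩
        rcases List.mem_cons.mp hl' with rfl | hm
        · exact absurd he hl
        · exact ⟨l', hm, he⟩
      show l.foldl (fun best_res x =>
        let res := calc_maximum_rec rest (c + x ^ 2) M
        if res > best_res then res else best_res) 0 = 0
      simp only [fun x => ih (c + x ^ 2) hrest]
      rw [pvFold_best0 (fun _ => (0 : Int)) l, pvMX_map_zero]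

-- clamping each mapped value at 0 does not change the clamped max
theorem pvMX_map_clamp (g : Int → Int) (l : List Int) :
    pvMX (l.map (fun x => max (g x) 0)) = pvMX (l.map g) := by
  induction l with
  | nil => rfl
  | cons a l ih =>
    simp only [List.map_cons, pvMX_cons, ih]
    have h0 := pvMX_nonneg (l.map g)
    omega

-- the main DP invariant: for a nonempty list of nonempty lists,
-- A's recursion equals the clamped max over the DP's reachable remainder set
theorem pvMain (ks : List (List Int)) (M : Int)
    (hne : ∀ l ∈ ks, l ≠ []) (hks : ks ≠ []) (c : Int) :
    calc_maximum_rec ks c M =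
      pvMX (ks.foldl (pvStep M) [PySem.Int.mod c M]) := by
  induction ks generalizing c with
  | nil => exact absurd rfl hks
  | cons l rest ih =>
    have hA : calc_maximum_rec (l :: rest) c M
        = pvMX (l.map (fun x => calc_maximum_rec rest (c + x ^ 2) M)) := by
      show l.foldl (fun best_res x =>
        let res := calc_maximum_rec rest (c + x ^ 2) M
        if res > best_res then res else best_res) 0 = _
      exact pvFold_best0 (fun x => calc_maximum_rec rest (c + x ^ 2) M) l
    have hstep : ∀ y, y ∈ (l :: rest).foldl (pvStep M) [PySem.Int.mod c M] ↔
        y ∈ l.flatMap (fun x => rest.foldl (pvStep M) [PySem.Int.mod (c + x ^ 2) M]) := by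
      intro y
      simp only [List.foldl_cons]
      rw [pvMem_foldl]
      constructor
      · rintro ⟨s, hs, hy⟩
        rcases (pvMem_step M _ l s).mp hs with ⟨r, hr, x, hx, rfl⟩
        rcases List.mem_singleton.mp hr with rfl
        rw [List.mem_flatMap]
        refine ⟨x, hx, ?_⟩
        rw [pvMod_mod_add, show c + x * x = c + x ^ 2 by ring] at hy
        exact hy
      · intro hy
        rcases List.mem_flatMap.mp hy with ⟨x, hx, hy⟩
        refine ⟨PySem.Int.mod (c + x ^ 2) M, ?_, hy⟩
        exact (pvMem_step M _ l _).mpr ⟨PySem.Int.mod c M, List.mem_singleton.mpr rfl, x, hx,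
          by rw [pvMod_mod_add, show c + x * x = c + x ^ 2 by ring]⟩
    rw [hA, pvMX_eq_of_mem_iff hstep, ← pvMX_map_flatMap]
    by_cases hrest : rest = []
    · -- rest = []: the DP over the remaining lists is the identity; only the 0-clamp remains
      subst hrest
      simp only [List.foldl_nil, calc_maximum_rec]
      rw [show (fun x => pvMX [PySem.Int.mod (c + x ^ 2) M])
            = (fun x => max (PySem.Int.mod (c + x ^ 2) M) 0) from funext (fun x => rfl),
          pvMX_map_clamp]
    · congr 1
      apply List.map_congr_left
      intro x _
      exact ih (fun l' hl' => hne l' (List.mem_cons_of_mem _ hl')) hrest (c + x ^ 2)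

-- ===== VERDICT (by name: the statement is the Claim_ definition above) =====
theorem calc_maximum_rec_spec : Claim_equal_calc_maximum_rec := by
  intro ks c M _ hpre
  unfold Spec_calc_maximum_rec calc_maximum_rec_alt
  by_cases hemp : ks.any (fun lst => lst.isEmpty) = true
  · rw [if_pos hemp]
    rcases List.any_eq_true.mp hemp with ⟨l, hl, he⟩
    exact pvA_empty ks c M ⟨l, hl, List.isEmpty_iff.mp he⟩
  · rw [if_neg hemp]
    have hne : ∀ l ∈ ks, l ≠ [] := by
      intro l hl
      simp only [List.any_eq_true] at hemp
      intro he
      exact hemp ⟨l, hl, by simp [he]⟩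
    cases ks with
    | nil => rfl
    | cons l rest =>
      rw [if_neg (by simp)]
      rw [pvFold_best0 (fun r => r) _, List.map_id']
      exact pvMain (l :: rest) M hne (by simp) c
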